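-- pv_equiv track=rewrite | github.com/dongmu/Laelaps | concolic/concolic/utils.py | repeatedSubstringCount
-- ===== SOURCE A (Python) =====
-- def repeatedSubstringCount(source):
--     """Look for the shortest substring which when repeated equals
--        the source string, without any left over characters.
--        Return the maximum repeat count, 1 if none found.
--     """
--     length = len(source)
--     maxLoop = 1
--
--     for x in range(1, length // 2 + 1):
--         substr = source[0-x:]
--
--         for y in range(length//len(substr), 1, -1):
--             if source[:length - y * len(substr)] + substr * y == source:
--                 maxLoop = maxLoop if maxLoop > y else y
--
--     return maxLoop
-- ===== SOURCE B (Python) =====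
-- def repeatedSubstringCount(source):
--     """Count consecutive copies of each suffix block directly: for each block
--     length x, walk backwards block by block; return the best count >= 2, else 1."""
--     n = len(source)
--     best = 1
--     for x in range(1, n // 2 + 1):
--         block = source[n - x:]
--         k = 1
--         i = n - 2 * x
--         while i >= 0 and source[i:i + x] == block:
--             k += 1
--             i -= x
--         if k > best:
--             best = k
--     return best
-- ===== Notes on version B (the rewrite author's own statement) =====
-- stated objective: faster
-- what changed: Instead of testing every repeat count y for every suffix length with a full-string rebuild-and-compare, B walks backwards block by block once per suffix length, counting consecutive copies of the trailing block directly.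
import Mathlib
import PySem

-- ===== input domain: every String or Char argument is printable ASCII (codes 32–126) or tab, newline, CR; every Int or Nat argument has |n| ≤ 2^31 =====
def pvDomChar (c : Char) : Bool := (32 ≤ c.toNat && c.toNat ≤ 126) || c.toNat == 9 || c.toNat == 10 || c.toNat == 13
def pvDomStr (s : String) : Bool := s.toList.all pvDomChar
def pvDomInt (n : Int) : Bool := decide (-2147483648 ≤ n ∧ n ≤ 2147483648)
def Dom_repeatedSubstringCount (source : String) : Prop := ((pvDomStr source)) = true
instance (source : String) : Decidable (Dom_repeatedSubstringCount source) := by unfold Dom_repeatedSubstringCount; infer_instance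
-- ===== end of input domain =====

-- B replaces A's per-repeat-count rebuild-and-compare of the whole string by one
-- backwards block-by-block walk per suffix length (objective: faster).


-- ===== PORT A =====
-- Python's 'substr * y' for an int y (empty when y ≤ 0)
def pyStrMul (cs : List Char) (y : Int) : List Char := (List.replicate y.toNat cs).flatten

def repeatedSubstringCount (source : String) : Int :=
  let cs := source.toList
  let length : Int := (cs.length : Int)
  (PySem.List.pyRange 1 (PySem.Int.floordiv length 2 + 1) 1).foldl
    (fun maxLoop x =>
      let substr := PySem.List.slice cs (some (0 - x)) none
      (PySem.List.pyRange (PySem.Int.floordiv length (substr.length : Int)) 1 (-1)).foldl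
        (fun maxLoop y =>
          if PySem.List.slice cs none (some (length - y * (substr.length : Int))) ++ pyStrMul substr y = cs
          then (if maxLoop > y then maxLoop else y)
          else maxLoop)
        maxLoop)
    1

-- ===== PORT B =====
-- Source B's 'while i >= 0 and source[i:i+x] == block: k += 1; i -= x'.
-- The fuel argument (cs.length) is a totalization guard only: for x ≥ 1 the loop
-- runs at most (n-2x)/x + 1 ≤ n-1 times.
def altLoop (cs block : List Char) (x : Int) : Nat → Int → Int → Int
  | 0, _, k => k
  | fuel+1, i, k =>
    if 0 ≤ i ∧ PySem.List.slice cs (some i) (some (i + x)) = block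
    then altLoop cs block x fuel (i - x) (k + 1)
    else k

def repeatedSubstringCount_alt (source : String) : Int :=
  let cs := source.toList
  let n := cs.length
  (List.range (n / 2)).foldl
    (fun best j =>
      let x := j + 1
      let block := cs.drop (n - x)   -- source[n-x:] (n-x ≥ 0)
      let k := altLoop cs block (x : Int) n ((n : Int) - 2 * (x : Int)) 1
      if k > best then k else best)
    1

-- ===== PRECONDITION & SPEC =====
def Spec_repeatedSubstringCount (source : String) (out : Int) : Prop := out = repeatedSubstringCount_alt source
instance (source : String) (out : Int) : Decidable (Spec_repeatedSubstringCount source out) := by unfold Spec_repeatedSubstringCount; infer_instance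

-- ===== CLAIM (what is proved, stated in full; the proofs are below) =====
def Claim_equal_repeatedSubstringCount : Prop := ∀ (source : String), Dom_repeatedSubstringCount source → Spec_repeatedSubstringCount source (repeatedSubstringCount source)

-- ===== LEMMAS AND PROOFS =====

def segB (cs : List Char) (x j : Nat) : List Char :=
  (cs.drop (cs.length - (j+1)*x)).take x

abbrev goodB (cs : List Char) (x j : Nat) : Prop :=
  (j+1)*x ≤ cs.length ∧ segB cs x j = cs.drop (cs.length - x)

theorem goodB_fails (cs : List Char) (x : Nat) (hx : 1 ≤ x) :
    ∃ j, ¬ goodB cs x (1 + j) := by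
  refine ⟨cs.length, fun h => ?_⟩
  have := h.1
  nlinarith [this]

theorem segB_zero (cs : List Char) (x : Nat) (hxn : x ≤ cs.length) :
    segB cs x 0 = cs.drop (cs.length - x) := by
  unfold segB
  simp only [Nat.zero_add, Nat.one_mul]
  apply List.take_of_length_le
  simp; omega

theorem take_append_eq_iff (l : List Char) (m : Nat) (F : List Char) :
    (l.take m ++ F = l) ↔ F = l.drop m := by
  have h := List.take_append_drop m l
  constructor
  · intro h2; exact List.append_cancel_left (h2.trans h.symm)
  · intro h2; rw [h2]; exact h

theorem chainL (cs : List Char) (x : Nat) (hx : 1 ≤ x) (hxn : x ≤ cs.length) :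
    ∀ y, 1 ≤ y → y * x ≤ cs.length →
      (cs.drop (cs.length - y * x) = (List.replicate y (cs.drop (cs.length - x))).flatten
        ↔ ∀ j < y, segB cs x j = cs.drop (cs.length - x)) := by
  intro y
  induction y with
  | zero => omega
  | succ y ih =>
    intro _ hyx
    have hsm : (y+1) * x = y * x + x := by ring
    rcases Nat.eq_zero_or_pos y with hy0 | hy1
    · subst hy0
      simp only [Nat.zero_add, List.replicate_one, List.flatten_cons, List.flatten_nil,
        List.append_nil, Nat.one_mul]
      constructor
      · intro _ j hj
        interval_cases j
        exact segB_zero cs x hxn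
      · intro _; trivial
    · -- y ≥ 1
      have hstep : cs.drop (cs.length - (y+1)*x)
          = segB cs x y ++ cs.drop (cs.length - y * x) := by
      -- split the first x chars off the length-(y+1)x suffix
        conv_lhs => rw [← List.take_append_drop x (cs.drop (cs.length - (y+1)*x))]
        unfold segB
        congr 1
        rw [List.drop_drop]
        congr 1
        omega
      have hlen_seg : (segB cs x y).length = x := by
        unfold segB
        simp
        omega
      have hlen_block : (cs.drop (cs.length - x)).length = x := by
        simp; omega
      rw [hstep, List.replicate_succ, List.flatten_cons]
      have hinj : (segB cs x y ++ cs.drop (cs.length - y*x)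
            = cs.drop (cs.length - x) ++ (List.replicate y (cs.drop (cs.length - x))).flatten)
          ↔ (segB cs x y = cs.drop (cs.length - x)
              ∧ cs.drop (cs.length - y*x) = (List.replicate y (cs.drop (cs.length - x))).flatten) := by
        constructor
        · intro h
          have := List.append_inj h (by rw [hlen_seg, hlen_block])
          exact this
        · rintro ⟨h1, h2⟩; rw [h1, h2]
      rw [hinj, ih hy1 (by omega)]
      constructor
      · rintro ⟨h1, h2⟩ j hj
        rcases Nat.lt_succ_iff_lt_or_eq.mp hj with hj' | hj'
        · exact h2 j hj'
        · subst hj'; exact h1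
      · intro h
        exact ⟨h y (Nat.lt_succ_self y), fun j hj => h j (Nat.lt_succ_of_lt hj)⟩

-- the loop condition at step j is goodB
theorem condB_iff (cs : List Char) (x j : Nat) :
    (0 ≤ (cs.length : Int) - (j+1) * x ∧
      PySem.List.slice cs (some ((cs.length : Int) - (j+1) * x))
        (some (((cs.length : Int) - (j+1) * x) + x)) = cs.drop (cs.length - x))
    ↔ goodB cs x j := by
  by_cases hle : (j+1) * x ≤ cs.length
  · have h0 : (0:Int) ≤ (cs.length : Int) - (j+1) * x := by
      push_cast
      have : ((j+1) * x : Nat) ≤ cs.length := hle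
      push_cast at this
      linarith
    have hc : (cs.length : Int) - ((j:Int) + 1) * (x:Int) = ((cs.length - (j+1)*x : Nat) : Int) := by
      rw [Nat.cast_sub hle]; push_cast; ring
    rw [hc, PySem.List.slice_natCast_add]
    unfold goodB segB
    exact ⟨fun h => ⟨hle, h.2⟩, fun h => ⟨Int.natCast_nonneg _, h.2⟩⟩
  · constructor
    · rintro ⟨h0, -⟩
      exfalso
      apply hle
      have : ((j+1) * x : Int) ≤ (cs.length : Int) := by linarith
      exact_mod_cast this
    · intro h; exact absurd h.1 hle

theorem loopL (cs : List Char) (x : Nat) (hx : 1 ≤ x) :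
    ∀ (m : Nat), ∀ (fuel : Nat) (y : Nat) (k : Int), m ≤ fuel →
      (∀ j, y ≤ j → j < y + m → goodB cs x j) → ¬ goodB cs x (y + m) →
      altLoop cs (cs.drop (cs.length - x)) x fuel ((cs.length : Int) - (y+1) * x) k = k + m := by
  intro m
  induction m with
  | zero =>
    intro fuel y k _ _ hbad
    simp only [Nat.add_zero] at hbad
    cases fuel with
    | zero => simp [altLoop]
    | succ f =>
      rw [altLoop, if_neg]
      · simp
      · rw [condB_iff cs x y]; exact hbad
  | succ m ih =>
    intro fuel y k hfuel hgood hbad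
    cases fuel with
    | zero => omega
    | succ f =>
      rw [altLoop, if_pos]
      · have harg : (cs.length : Int) - (y+1) * x - x = (cs.length : Int) - ((y+1)+1) * x := by
          push_cast; ring
        rw [harg]
        have := ih f (y+1) (k+1) (by omega)
          (fun j hj1 hj2 => hgood j (by omega) (by omega))
          (by have : y + 1 + m = y + (m+1) := by omega
              rw [this]; exact hbad)
        push_cast at this ⊢
        rw [this]; ring
      · rw [condB_iff cs x y]
        exact hgood y le_rfl (by omega)

def Mcnt (cs : List Char) (x : Nat) (hx : 1 ≤ x) : Nat :=
  Nat.find (goodB_fails cs x hx)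

theorem Mcnt_good (cs : List Char) (x : Nat) (hx : 1 ≤ x) :
    ∀ j, 1 ≤ j → j < 1 + Mcnt cs x hx → goodB cs x j := by
  intro j h1 h2
  have := Nat.find_min (goodB_fails cs x hx) (m := j - 1) (by unfold Mcnt at h2; omega)
  have hj : 1 + (j - 1) = j := by omega
  rw [hj] at this
  exact not_not.mp this

theorem Mcnt_bad (cs : List Char) (x : Nat) (hx : 1 ≤ x) :
    ¬ goodB cs x (1 + Mcnt cs x hx) :=
  Nat.find_spec (goodB_fails cs x hx)

theorem Mcnt_le (cs : List Char) (x : Nat) (hx : 1 ≤ x) :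
    Mcnt cs x hx ≤ cs.length := by
  apply Nat.find_le
  intro h
  have := h.1
  nlinarith [this]

-- B's inner loop computes 1 + Mcnt
theorem altLoop_eq (cs : List Char) (x : Nat) (hx : 1 ≤ x) :
    altLoop cs (cs.drop (cs.length - x)) x cs.length ((cs.length : Int) - 2 * x) 1
      = 1 + (Mcnt cs x hx : Int) := by
  have harg : (cs.length : Int) - 2 * x = (cs.length : Int) - ((1:Nat)+1) * x := by push_cast; ring
  rw [harg]
  exact loopL cs x hx (Mcnt cs x hx) cs.length 1 1 (Mcnt_le cs x hx)
    (fun j hj1 hj2 => Mcnt_good cs x hx j hj1 hj2) (Mcnt_bad cs x hx)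

theorem segAll_iff (cs : List Char) (x : Nat) (hx : 1 ≤ x) (hxn : 2*x ≤ cs.length)
    (y : Nat) (hy1 : 1 ≤ y) (hyx : y * x ≤ cs.length) :
    (∀ j < y, segB cs x j = cs.drop (cs.length - x)) ↔ y ≤ 1 + Mcnt cs x hx := by
  constructor
  · intro h
    by_contra hlt
    push_neg at hlt
    apply Mcnt_bad cs x hx
    refine ⟨?_, h (1 + Mcnt cs x hx) (by omega)⟩
    calc (1 + Mcnt cs x hx + 1) * x ≤ y * x := by
          apply Nat.mul_le_mul_right; omega
      _ ≤ cs.length := hyx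
  · intro hy j hj
    rcases Nat.eq_zero_or_pos j with h0 | h1
    · subst h0; exact segB_zero cs x (by omega)
    · exact (Mcnt_good cs x hx j h1 (by omega)).2

-- A's inner test, at Int level, is "y ≤ 1 + Mcnt"
theorem Pint_iff (cs : List Char) (x : Nat) (hx : 1 ≤ x) (hxn : 2*x ≤ cs.length)
    (y : Int) (hy2 : 2 ≤ y) (hyb : y ≤ ((cs.length / x : Nat) : Int)) :
    (PySem.List.slice cs none (some ((cs.length : Int) - y * x)) ++ pyStrMul (cs.drop (cs.length - x)) y = cs)
    ↔ y ≤ 1 + (Mcnt cs x hx : Int) := by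
  obtain ⟨yN, rfl⟩ : ∃ yN : Nat, y = (yN : Int) := ⟨y.toNat, (Int.toNat_of_nonneg (by omega)).symm⟩
  have hyN2 : 2 ≤ yN := by exact_mod_cast hy2
  have hyNb : yN ≤ cs.length / x := by exact_mod_cast hyb
  have hyx : yN * x ≤ cs.length := Nat.le_div_iff_mul_le (by omega) |>.mp hyNb
  have hcast : (cs.length : Int) - (yN : Int) * (x : Int) = ((cs.length - yN * x : Nat) : Int) := by
    rw [Nat.cast_sub hyx]; push_cast; ring
  rw [hcast, PySem.List.slice_to_natCast]
  have hmul : pyStrMul (cs.drop (cs.length - x)) (yN : Int) = (List.replicate yN (cs.drop (cs.length - x))).flatten := by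
    unfold pyStrMul; rw [Int.toNat_natCast]
  rw [hmul, take_append_eq_iff, eq_comm,
    chainL cs x hx (by omega) yN (by omega) hyx,
    segAll_iff cs x hx hxn yN (by omega) hyx]
  exact_mod_cast Iff.rfl

theorem maxIf (a y : Int) : (if a > y then a else y) = max a y := by
  rw [max_def]; split_ifs <;> omega

theorem foldDesc (Q : Int → Prop) [DecidablePred Q] (c : Int) (hc : 1 ≤ c) :
    ∀ (t : Nat), ∀ (b : Int), (b - 1).toNat = t →
      (∀ y, 2 ≤ y → y ≤ b → (Q y ↔ y ≤ c)) →
      ∀ acc : Int, 1 ≤ acc →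
      (PySem.List.pyRange b 1 (-1)).foldl
          (fun a y => if Q y then (if a > y then a else y) else a) acc
        = max acc (min c b) := by
  intro t
  induction t using Nat.strong_induction_on with
  | _ t ih =>
    intro b hb hQ acc hacc
    by_cases hb2 : b ≤ 1
    · rw [PySem.List.pyRange_neg_one_eq_nil hb2]
      simp only [List.foldl_nil]
      omega
    · push_neg at hb2
      rw [PySem.List.pyRange_neg_one_cons hb2, List.foldl_cons]
      have hrec := ih (b - 1 - 1).toNat (by omega) (b - 1) rfl
        (fun y h2 hyb => hQ y h2 (by omega))
      by_cases hQb : Q b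
      · have hbc : b ≤ c := (hQ b (by omega) le_rfl).mp hQb
        rw [if_pos hQb, maxIf]
        rw [hrec (max acc b) (by omega)]
        omega
      · have hbc : ¬ b ≤ c := fun h => hQb ((hQ b (by omega) le_rfl).mpr h)
        rw [if_neg hQb, hrec acc hacc]
        omega

theorem maxIf' (a y : Int) : (if y > a then y else a) = max a y := by
  rw [max_def]; split_ifs <;> omega

theorem Mcnt_add_one_le (cs : List Char) (x : Nat) (hx : 1 ≤ x) (hxn : 2*x ≤ cs.length) :
    1 + Mcnt cs x hx ≤ cs.length / x := by
  rcases Nat.eq_zero_or_pos (Mcnt cs x hx) with h0 | h1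
  · rw [h0]
    exact Nat.le_div_iff_mul_le (by omega) |>.mpr (by omega)
  · have hg := Mcnt_good cs x hx (Mcnt cs x hx) h1 (by omega)
    have := hg.1
    exact Nat.le_div_iff_mul_le (by omega) |>.mpr (by calc
      (1 + Mcnt cs x hx) * x = (Mcnt cs x hx + 1) * x := by ring
      _ ≤ cs.length := this)

def Abody (cs : List Char) (maxLoop x : Int) : Int :=
  (PySem.List.pyRange (PySem.Int.floordiv (cs.length : Int) ((PySem.List.slice cs (some (0 - x)) none).length : Int)) 1 (-1)).foldl
    (fun maxLoop y =>
      if PySem.List.slice cs none (some ((cs.length : Int) - y * ((PySem.List.slice cs (some (0 - x)) none).length : Int))) ++ pyStrMul (PySem.List.slice cs (some (0 - x)) none) y = cs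
      then (if maxLoop > y then maxLoop else y)
      else maxLoop)
    maxLoop

theorem stepA (cs : List Char) (j : Nat) (hj : j < cs.length / 2) (acc : Int) (hacc : 1 ≤ acc) :
    Abody cs acc (1 + (j : Int)) = max acc (1 + (Mcnt cs (j+1) (Nat.le_add_left 1 j) : Int)) := by
  have hxn : 2 * (j+1) ≤ cs.length := by
    have : j + 1 ≤ cs.length / 2 := hj
    have := Nat.le_div_iff_mul_le (k := 2) (by omega) |>.mp this
    omega
  unfold Abody
  have hneg : (0:Int) - (1 + (j:Int)) = -(((j+1 : Nat)) : Int) := by push_cast; ring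
  rw [hneg, PySem.List.slice_from_neg_natCast _ _ (by omega)]
  have hlen : ((cs.drop (cs.length - (j+1))).length : Int) = ((j+1 : Nat) : Int) := by
    simp; omega
  rw [hlen, PySem.Int.floordiv_natCast]
  rw [foldDesc _ (1 + (Mcnt cs (j+1) (Nat.le_add_left 1 j) : Int)) (by omega)
    ((((cs.length / (j+1) : Nat) : Int)) - 1).toNat _ rfl
    (fun y h2 hyb => Pint_iff cs (j+1) (Nat.le_add_left 1 j) hxn y h2 hyb)
    acc hacc]
  have hle : 1 + Mcnt cs (j+1) (Nat.le_add_left 1 j) ≤ cs.length / (j+1) :=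
    Mcnt_add_one_le cs (j+1) (Nat.le_add_left 1 j) hxn
  have : (1 : Int) + (Mcnt cs (j+1) (Nat.le_add_left 1 j) : Int) ≤ ((cs.length / (j+1) : Nat) : Int) := by
    exact_mod_cast hle
  omega

def Bbody (cs : List Char) (best : Int) (j : Nat) : Int :=
  if altLoop cs (cs.drop (cs.length - (j+1))) ((j+1 : Nat) : Int) cs.length ((cs.length : Int) - 2 * ((j+1 : Nat) : Int)) 1 > best
  then altLoop cs (cs.drop (cs.length - (j+1))) ((j+1 : Nat) : Int) cs.length ((cs.length : Int) - 2 * ((j+1 : Nat) : Int)) 1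
  else best

theorem stepB (cs : List Char) (j : Nat) (best : Int) :
    Bbody cs best j = max best (1 + (Mcnt cs (j+1) (Nat.le_add_left 1 j) : Int)) := by
  unfold Bbody
  rw [altLoop_eq cs (j+1) (Nat.le_add_left 1 j), maxIf']

theorem outerL (cs : List Char) :
    ∀ (l : List Nat), (∀ j ∈ l, j < cs.length / 2) → ∀ acc : Int, 1 ≤ acc →
      l.foldl (fun (a : Int) (j : Nat) => Abody cs a (1 + (j : Int))) acc = l.foldl (Bbody cs) acc := by
  intro l
  induction l with
  | nil => intro _ acc _; rfl
  | cons j l ih =>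
    intro hmem acc hacc
    simp only [List.foldl_cons]
    rw [stepA cs j (hmem j (List.mem_cons_self)) acc hacc, ← stepB cs j acc,
      stepB cs j acc]
    exact ih (fun i hi => hmem i (List.mem_cons_of_mem _ hi)) _ (by omega)

theorem A_eq (source : String) :
    repeatedSubstringCount source
      = (List.range (source.toList.length / 2)).foldl
          (fun (a : Int) (j : Nat) => Abody source.toList a (1 + (j : Int))) 1 := by
  have h1 : repeatedSubstringCount source
      = (PySem.List.pyRange 1 (PySem.Int.floordiv (source.toList.length : Int) 2 + 1) 1).foldl
          (Abody source.toList) 1 := rfl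
  rw [h1]
  have h2 : PySem.Int.floordiv (source.toList.length : Int) 2 = ((source.toList.length / 2 : Nat) : Int) := by
    exact_mod_cast PySem.Int.floordiv_natCast _ 2
  rw [h2, PySem.List.pyRange_one]
  have h3 : (((source.toList.length / 2 : Nat) : Int) + 1 - 1).toNat = source.toList.length / 2 := by
    omega
  rw [h3, List.foldl_map]

theorem B_eq (source : String) :
    repeatedSubstringCount_alt source
      = (List.range (source.toList.length / 2)).foldl (Bbody source.toList) 1 := rfl

theorem final (source : String) : repeatedSubstringCount source = repeatedSubstringCount_alt source := by
  rw [A_eq, B_eq]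
  exact outerL source.toList _ (fun j hj => List.mem_range.mp hj) 1 le_rfl

-- ===== VERDICT (by name: the statement is the Claim_ definition above) =====
theorem repeatedSubstringCount_spec : Claim_equal_repeatedSubstringCount := by
  intro source _
  unfold Spec_repeatedSubstringCount
  exact final source
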